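-- pv_equiv track=rewrite | github.com/Francoo86/JADE-Timetabling-Redux | agent_output/schedule_checking.py | validate_continuous_blocks
-- ===== SOURCE A (Python) =====
-- from typing import List, Dict, Set, Tuple, Optional
--
-- def validate_continuous_blocks(blocks: List[int], is_practical: bool) -> bool:
--     """Validate continuous blocks based on activity type"""
--     if is_practical:
--         # Allow up to 3 continuous blocks for practical activities
--         blocks = sorted(blocks)
--         continuous = 1
--         for i in range(1, len(blocks)):
--             if blocks[i] == blocks[i-1] + 1:
--                 continuous += 1
--                 if continuous > 3:
--                     return False
--             else:
--                 continuous = 1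
--         return True
--
--     # For theory classes, max 2 continuous blocks
--     blocks = sorted(blocks)
--     continuous = 1
--     for i in range(1, len(blocks)):
--         if blocks[i] == blocks[i-1] + 1:
--             continuous += 1
--             if continuous > 2:
--                 return False
--         else:
--             continuous = 1
--     return True
-- ===== SOURCE B (Python) =====
-- def _run_lengths(ks):
--     """Lengths of maximal groups of equal adjacent values."""
--     if not ks:
--         return []
--     out = []
--     key, cnt = ks[0], 1
--     for k in ks[1:]:
--         if k == key:
--             cnt += 1
--         else:
--             out.append(cnt)
--             key, cnt = k, 1
--     out.append(cnt)
--     return out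
--
--
-- def validate_continuous_blocks(blocks, is_practical):
--     limit = 3 if is_practical else 2
--     s = sorted(blocks)
--     # value minus position is constant exactly within a maximal run of
--     # strictly-consecutive integers (duplicates break the key, as intended)
--     keys = [v - i for i, v in enumerate(s)]
--     return max(_run_lengths(keys), default=0) <= limit
-- ===== Notes on version B (the rewrite author's own statement) =====
-- stated objective: alternative
-- what changed: Replaces the two duplicated running-counter loops with early return by a single grouping pass: group the sorted values by the value-minus-index key (constant exactly on a run of consecutive integers) and compare the longest group length with the limit.
import Mathlib
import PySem

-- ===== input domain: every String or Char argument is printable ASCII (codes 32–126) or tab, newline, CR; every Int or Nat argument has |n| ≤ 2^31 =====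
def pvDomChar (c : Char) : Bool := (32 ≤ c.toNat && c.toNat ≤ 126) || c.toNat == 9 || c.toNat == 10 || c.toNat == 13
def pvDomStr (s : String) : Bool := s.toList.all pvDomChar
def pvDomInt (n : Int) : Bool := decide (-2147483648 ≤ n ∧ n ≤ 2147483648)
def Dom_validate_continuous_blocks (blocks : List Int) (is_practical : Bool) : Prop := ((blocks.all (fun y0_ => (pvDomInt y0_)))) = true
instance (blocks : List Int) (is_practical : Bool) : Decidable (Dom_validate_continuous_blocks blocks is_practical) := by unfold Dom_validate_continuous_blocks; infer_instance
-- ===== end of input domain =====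

-- B replaces A's duplicated running-counter loops by one value-minus-index grouping pass (alternative algorithm, same cost).


-- ===== PORT A =====
-- A's two duplicated scan loops (limits 3 and 2), kept duplicated as in the source.
def vcbLoop3 (prev : Int) (cont : Nat) : List Int → Bool
  | [] => true
  | x :: xs =>
      if x = prev + 1 then
        (if cont + 1 > 3 then false else vcbLoop3 x (cont + 1) xs)
      else vcbLoop3 x 1 xs

def vcbLoop2 (prev : Int) (cont : Nat) : List Int → Bool
  | [] => true
  | x :: xs =>
      if x = prev + 1 then
        (if cont + 1 > 2 then false else vcbLoop2 x (cont + 1) xs)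
      else vcbLoop2 x 1 xs

def validate_continuous_blocks (blocks : List Int) (is_practical : Bool) : Bool :=
  if is_practical then
    match PySem.List.sorted blocks id with
    | [] => true
    | h :: t => vcbLoop3 h 1 t
  else
    match PySem.List.sorted blocks id with
    | [] => true
    | h :: t => vcbLoop2 h 1 t

-- ===== PORT B =====
-- hand port of the comprehension [v - i for i, v in enumerate(s)] (exact: index starts at 0, steps by 1)
def vcbKeys (i : Int) : List Int → List Int
  | [] => []
  | v :: vs => (v - i) :: vcbKeys (i + 1) vs

-- hand port of _run_lengths (groupby-style grouping of equal adjacent keys)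
def vcbRLGo (key : Int) (cnt : Nat) : List Int → List Nat
  | [] => [cnt]
  | k :: ks => if k = key then vcbRLGo key (cnt + 1) ks else cnt :: vcbRLGo k 1 ks

def vcbRunLengths : List Int → List Nat
  | [] => []
  | k :: ks => vcbRLGo k 1 ks

def validate_continuous_blocks_alt (blocks : List Int) (is_practical : Bool) : Bool :=
  let limit : Nat := if is_practical then 3 else 2
  let s := PySem.List.sorted blocks id
  let keys := vcbKeys 0 s
  decide ((vcbRunLengths keys).foldl max 0 ≤ limit)

-- ===== PRECONDITION & SPEC =====
def Spec_validate_continuous_blocks (blocks : List Int) (is_practical : Bool) (out : Bool) : Prop := out = validate_continuous_blocks_alt blocks is_practical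
instance (blocks : List Int) (is_practical : Bool) (out : Bool) : Decidable (Spec_validate_continuous_blocks blocks is_practical out) := by unfold Spec_validate_continuous_blocks; infer_instance

-- ===== CLAIM (what is proved, stated in full; the proofs are below) =====
def Claim_equal_validate_continuous_blocks : Prop := ∀ (blocks : List Int) (is_practical : Bool), Dom_validate_continuous_blocks blocks is_practical → Spec_validate_continuous_blocks blocks is_practical (validate_continuous_blocks blocks is_practical)

-- ===== LEMMAS AND PROOFS =====
-- mathematical scan: maximum chain length reachable, continuing from prev with current count c
def vcbMRW (prev : Int) (c : Nat) : List Int → Nat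
  | [] => c
  | x :: xs => if x = prev + 1 then vcbMRW x (c + 1) xs else max c (vcbMRW x 1 xs)

theorem vcbMRW_ge (xs : List Int) (prev : Int) (c : Nat) : c ≤ vcbMRW prev c xs := by
  induction xs generalizing prev c with
  | nil => simp [vcbMRW]
  | cons x xs ih =>
      simp only [vcbMRW]
      split
      · exact le_trans (Nat.le_succ c) (ih x (c + 1))
      · exact le_max_left _ _

theorem vcbLoop3_eq (xs : List Int) (prev : Int) (c : Nat) (hc : c ≤ 3) :
    vcbLoop3 prev c xs = decide (vcbMRW prev c xs ≤ 3) := by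
  induction xs generalizing prev c with
  | nil => simp [vcbLoop3, vcbMRW, hc]
  | cons x xs ih =>
      simp only [vcbLoop3, vcbMRW]
      split
      · split
        · have h1 := vcbMRW_ge xs x (c + 1)
          have h2 : ¬ vcbMRW x (c + 1) xs ≤ 3 := by omega
          simp [h2]
        · exact ih x (c + 1) (by omega)
      · rw [ih x 1 (by omega)]
        have h3 : (max c (vcbMRW x 1 xs) ≤ 3) ↔ (vcbMRW x 1 xs ≤ 3) := by omega
        simp [h3]

theorem vcbLoop2_eq (xs : List Int) (prev : Int) (c : Nat) (hc : c ≤ 2) :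
    vcbLoop2 prev c xs = decide (vcbMRW prev c xs ≤ 2) := by
  induction xs generalizing prev c with
  | nil => simp [vcbLoop2, vcbMRW, hc]
  | cons x xs ih =>
      simp only [vcbLoop2, vcbMRW]
      split
      · split
        · have h1 := vcbMRW_ge xs x (c + 1)
          have h2 : ¬ vcbMRW x (c + 1) xs ≤ 2 := by omega
          simp [h2]
        · exact ih x (c + 1) (by omega)
      · rw [ih x 1 (by omega)]
        have h3 : (max c (vcbMRW x 1 xs) ≤ 2) ↔ (vcbMRW x 1 xs ≤ 2) := by omega
        simp [h3]

theorem vcb_foldl_max (l : List Nat) (a : Nat) : l.foldl max a = max a (l.foldl max 0) := by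
  induction l generalizing a with
  | nil => simp
  | cons x l ih =>
      simp only [List.foldl_cons]
      rw [ih (max a x), ih (max 0 x)]
      omega

theorem vcbRLGo_eq (xs : List Int) (prev i : Int) (c : Nat) :
    (vcbRLGo (prev - i) c (vcbKeys (i + 1) xs)).foldl max 0 = vcbMRW prev c xs := by
  induction xs generalizing prev i c with
  | nil => simp [vcbKeys, vcbRLGo, vcbMRW]
  | cons x xs ih =>
      simp only [vcbKeys, vcbRLGo, vcbMRW]
      by_cases h : x = prev + 1
      · have hk : x - (i + 1) = prev - i := by omega
        simp only [hk, if_pos h]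
        have h4 := ih x (i + 1) (c + 1)
        rw [hk] at h4
        exact h4
      · have hk : ¬ (x - (i + 1) = prev - i) := by omega
        simp only [if_neg hk, if_neg h, List.foldl_cons]
        rw [vcb_foldl_max, Nat.max_comm 0 c, Nat.max_zero, ih x (i + 1) 1]

theorem vcb_alt_eq (blocks : List Int) (lim : Nat) :
    decide ((vcbRunLengths (vcbKeys 0 (PySem.List.sorted blocks id))).foldl max 0 ≤ lim)
      = (match PySem.List.sorted blocks id with
        | [] => true
        | h :: t => decide (vcbMRW h 1 t ≤ lim)) := by
  cases hs : PySem.List.sorted blocks id with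
  | nil => simp [vcbKeys, vcbRunLengths]
  | cons h t =>
      simp only [vcbKeys, vcbRunLengths]
      have h5 := vcbRLGo_eq t h 0 1
      norm_num at h5 ⊢
      simp [h5]

-- ===== VERDICT (by name: the statement is the Claim_ definition above) =====
theorem validate_continuous_blocks_spec : Claim_equal_validate_continuous_blocks := by
  intro blocks is_practical _
  unfold Spec_validate_continuous_blocks validate_continuous_blocks validate_continuous_blocks_alt
  cases is_practical with
  | false =>
      simp only [Bool.false_eq_true, if_false]
      rw [vcb_alt_eq blocks 2]
      cases PySem.List.sorted blocks id with
      | nil => rfl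
      | cons h t => simpa using vcbLoop2_eq t h 1 (by omega)
  | true =>
      simp only [if_true]
      rw [vcb_alt_eq blocks 3]
      cases PySem.List.sorted blocks id with
      | nil => rfl
      | cons h t => simpa using vcbLoop3_eq t h 1 (by omega)
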